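-- pv_equiv track=rewrite | github.com/BananaNosh/EulerProject | problem_1-7.py | prim_factors
-- ===== SOURCE A (Python) =====
-- def prim_factors(number):
--     not_divisors = set()
--     factors = []
--     for i in range(2, number // 2):
--         if i in not_divisors:
--             not_divisors.remove(i)
--             continue
--         if number % i == 0:
--             factors.append(i)
--         for j in range(i, (number + 1) // 2, i):
--             not_divisors.add(j)
--     if len(factors) == 0:
--         factors = [1, number]
--     return factors
-- ===== SOURCE B (Python) =====
-- def _is_prime(d):
--     k = 2
--     while k * k <= d:
--         if d % k == 0:
--             return False
--         k += 1
--     return True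
--
--
-- def prim_factors(number):
--     factors = [d for d in range(2, number // 2)
--                if number % d == 0 and _is_prime(d)]
--     return factors if factors else [1, number]
-- ===== Notes on version B (the rewrite author's own statement) =====
-- stated objective: faster
-- what changed: A sieves: it incrementally marks every multiple of each found prime in a set and skips marked candidates; B drops the marking set entirely and instead tests each candidate d in [2, number//2) directly with number % d == 0 plus trial division of d up to sqrt(d).
import Mathlib
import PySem

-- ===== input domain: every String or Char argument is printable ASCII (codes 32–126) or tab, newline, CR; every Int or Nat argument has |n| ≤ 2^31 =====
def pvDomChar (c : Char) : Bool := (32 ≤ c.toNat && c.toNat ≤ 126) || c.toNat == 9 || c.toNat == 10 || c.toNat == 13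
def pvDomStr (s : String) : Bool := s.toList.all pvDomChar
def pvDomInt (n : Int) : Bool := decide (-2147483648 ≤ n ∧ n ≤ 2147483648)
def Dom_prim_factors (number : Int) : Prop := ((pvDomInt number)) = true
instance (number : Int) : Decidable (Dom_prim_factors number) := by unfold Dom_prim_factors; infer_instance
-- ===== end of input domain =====

-- B replaces A's incremental multiple-marking sieve by a direct scan that tests each
-- candidate divisor with trial division up to its square root (objective: faster,
-- measured constant/log-factor speedup; same return value on every int).

-- ===== PORT A =====
-- loop body of A's 'for i in range(2, number // 2)' (helper named for the proofs)
def primStep (number : Int) (st : PySem.Set Int × List Int) (i : Int) :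
    PySem.Set Int × List Int :=
  if PySem.Set.contains st.1 i then
    -- not_divisors.remove(i): exact, membership is guaranteed by the guard
    (PySem.Set.discard st.1 i, st.2)
  else
    let factors := if PySem.Int.mod number i == 0 then st.2 ++ [i] else st.2
    ((PySem.List.pyRange i (PySem.Int.floordiv (number + 1) 2) i).foldl PySem.Set.add st.1,
      factors)

def prim_factors (number : Int) : List Int :=
  let res := (PySem.List.pyRange 2 (PySem.Int.floordiv number 2)).foldl
      (primStep number) (PySem.Set.empty, [])
  if res.2.length == 0 then [1, number] else res.2

-- ===== PORT B =====
-- B's helper _is_prime: while k * k <= d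
def isPrimeLoop (d k : Int) : Bool :=
  if h : k * k ≤ d then
    if PySem.Int.mod d k == 0 then false else isPrimeLoop d (k + 1)
  else true
termination_by (d + 1 - k).toNat
decreasing_by
  have hd : 0 ≤ d := le_trans (mul_self_nonneg k) h
  have hk : k ≤ d := by
    rcases le_or_gt k 0 with h0 | h0
    · omega
    · nlinarith
  omega

def is_prime (d : Int) : Bool := isPrimeLoop d 2

def prim_factors_alt (number : Int) : List Int :=
  let factors := (PySem.List.pyRange 2 (PySem.Int.floordiv number 2)).filter
      (fun d => PySem.Int.mod number d == 0 && is_prime d)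
  if factors.isEmpty then [1, number] else factors

-- ===== PRECONDITION & SPEC =====
def Spec_prim_factors (number : Int) (out : List Int) : Prop := out = prim_factors_alt number
instance (number : Int) (out : List Int) : Decidable (Spec_prim_factors number out) := by unfold Spec_prim_factors; infer_instance

-- ===== CLAIM (what is proved, stated in full; the proofs are below) =====
def Claim_equal_prim_factors : Prop := ∀ (number : Int), Dom_prim_factors number → Spec_prim_factors number (prim_factors number)

-- ===== LEMMAS AND PROOFS =====

-- divisibility transfers between nonnegative Ints and their toNat images
theorem pv_dvd_toNat {p j : Int} (hp : 0 ≤ p) (hj : 0 ≤ j) :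
    p ∣ j ↔ p.toNat ∣ j.toNat := by
  rw [← Int.natCast_dvd_natCast, Int.toNat_of_nonneg hp, Int.toNat_of_nonneg hj]

-- a proper divisor 2 ≤ p < i kills primality of i
theorem pv_not_prime_of_div {p i : Int} (h2 : 2 ≤ p) (hlt : p < i) (hd : p ∣ i) :
    ¬ Nat.Prime i.toNat := by
  intro hpr
  have hdn : p.toNat ∣ i.toNat := (pv_dvd_toNat (by omega) (by omega)).mp hd
  rcases hpr.eq_one_or_self_of_dvd _ hdn with h | h <;> omega

-- a non-prime i ≥ 2 has a prime divisor 2 ≤ p < i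
theorem pv_exists_prime_div {i : Int} (h2 : 2 ≤ i) (h : ¬ Nat.Prime i.toNat) :
    ∃ p : Int, 2 ≤ p ∧ p < i ∧ Nat.Prime p.toNat ∧ p ∣ i := by
  set n := i.toNat with hn
  have hn2 : 2 ≤ n := by omega
  have hpr : Nat.Prime n.minFac := Nat.minFac_prime (by omega)
  have hdv : n.minFac ∣ n := Nat.minFac_dvd n
  have hne : n.minFac ≠ n := fun he => h (Nat.prime_def_minFac.mpr ⟨hn2, he⟩)
  have hle : n.minFac ≤ n := Nat.le_of_dvd (by omega) hdv
  refine ⟨(n.minFac : Int), by exact_mod_cast hpr.two_le, by omega, by simp [hpr], ?_⟩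
  have : (n.minFac : Int) ∣ (n : Int) := Int.natCast_dvd_natCast.mpr hdv
  simpa [hn, Int.toNat_of_nonneg (by omega : (0:Int) ≤ i)] using this

-- if i ≥ 2 divides a prime j then i = j
theorem pv_prime_dvd_eq {i j : Int} (h2 : 2 ≤ i) (hj : Nat.Prime j.toNat) (hd : i ∣ j) :
    i = j := by
  have hj2 : 2 ≤ j.toNat := hj.two_le
  have hjn : 0 ≤ j := by omega
  have hdn : i.toNat ∣ j.toNat := (pv_dvd_toNat (by omega) hjn).mp hd
  rcases hj.eq_one_or_self_of_dvd _ hdn with h | h <;> omega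

-- the trial-division loop checks all m ≥ k with m * m ≤ d
theorem pv_isPrimeLoop_iff (d : Int) : ∀ fuel : Nat, ∀ k : Int, (d + 1 - k).toNat ≤ fuel → 2 ≤ k →
    (isPrimeLoop d k = true ↔ ∀ m : Int, k ≤ m → m * m ≤ d → ¬ m ∣ d) := by
  intro fuel
  induction fuel with
  | zero =>
    intro k hk h2
    have hdk : d + 1 ≤ k := by omega
    have hkk : ¬ k * k ≤ d := by nlinarith
    rw [isPrimeLoop]
    simp only [hkk, dite_false, true_iff]
    intro m hm hmm
    nlinarith
  | succ fuel ih =>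
    intro k hk h2
    rw [isPrimeLoop]
    by_cases h : k * k ≤ d
    · simp only [h, dite_true]
      rcases eq_or_ne (PySem.Int.mod d k) 0 with hm | hm
      · have hdvd : k ∣ d := (PySem.Int.mod_eq_zero_iff_dvd d k).mp hm
        simp only [hm, BEq.rfl, if_true]
        constructor
        · intro hfalse; exact absurd hfalse (by simp)
        · intro hall; exact absurd hdvd (hall k le_rfl h)
      · have hm' : (PySem.Int.mod d k == 0) = false := by simp [hm]
        simp only [hm', Bool.false_eq_true, if_false]
        have hkd : k ≤ d := by nlinarith
        rw [ih (k + 1) (by omega) (by omega)]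
        constructor
        · intro hall m hkm hmm hdvd
          rcases eq_or_lt_of_le hkm with he | hlt
          · exact hm ((PySem.Int.mod_eq_zero_iff_dvd d k).mpr (he ▸ hdvd))
          · exact hall m (by omega) hmm hdvd
        · intro hall m hkm hmm hdvd
          exact hall m (by omega) hmm hdvd
    · simp only [h, dite_false, true_iff]
      intro m hm hmm hdvd
      nlinarith

-- B's is_prime agrees with Nat.Prime on d ≥ 2
theorem pv_is_prime_iff {d : Int} (h2 : 2 ≤ d) :
    is_prime d = true ↔ Nat.Prime d.toNat := by
  rw [is_prime, pv_isPrimeLoop_iff d (d + 1 - 2).toNat 2 (le_refl _) (le_refl _)]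
  constructor
  · intro hall
    rw [Nat.prime_def_le_sqrt]
    refine ⟨by omega, fun m hm hms hdvd => ?_⟩
    have hmm : (m : Int) * m ≤ d := by
      have := Nat.le_sqrt.mp hms
      have : (↑(m * m) : Int) ≤ ↑d.toNat := by exact_mod_cast this
      push_cast at this
      omega
    exact hall m (by exact_mod_cast hm) hmm
      ((pv_dvd_toNat (by positivity) (by omega)).mpr (by simpa using hdvd))
  · intro hpr m hm hmm hdvd
    have hmn : m.toNat ∣ d.toNat := (pv_dvd_toNat (by omega) (by omega)).mp hdvd
    have hms : m.toNat ≤ d.toNat.sqrt := by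
      rw [Nat.le_sqrt]
      have : ((m.toNat * m.toNat : Nat) : Int) ≤ (d.toNat : Int) := by
        push_cast
        rw [Int.toNat_of_nonneg (by omega : (0:Int) ≤ m), Int.toNat_of_nonneg (by omega : (0:Int) ≤ d)]
        exact hmm
      exact_mod_cast this
    exact (Nat.prime_def_le_sqrt.mp hpr).2 m.toNat (by omega) hms hmn

-- membership invariant of A's not_divisors set before processing i
def Phi (number i j : Int) : Prop :=
  j < PySem.Int.floordiv (number + 1) 2 ∧
  ∃ p : Int, 2 ≤ p ∧ p < i ∧ Nat.Prime p.toNat ∧ p ∣ j ∧ (i ≤ j ∨ Nat.Prime j.toNat)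

-- the sieve loop appends exactly the primes dividing number, in order
theorem pv_sieve (number : Int) : ∀ fuel : Nat, ∀ i : Int,
    (PySem.Int.floordiv number 2 - i).toNat ≤ fuel → 2 ≤ i →
    ∀ (S : PySem.Set Int) (F : List Int), (∀ j, j ∈ S ↔ Phi number i j) →
    ((PySem.List.pyRange i (PySem.Int.floordiv number 2)).foldl (primStep number) (S, F)).2
      = F ++ (PySem.List.pyRange i (PySem.Int.floordiv number 2)).filter
          (fun x => decide (Nat.Prime x.toNat) && (PySem.Int.mod number x == 0)) := by
  have hH : PySem.Int.floordiv number 2 ≤ PySem.Int.floordiv (number + 1) 2 := by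
    rw [PySem.Int.floordiv_eq_ediv_of_pos (by omega), PySem.Int.floordiv_eq_ediv_of_pos (by omega)]
    omega
  intro fuel
  induction fuel with
  | zero =>
    intro i hfuel h2 S F hInv
    rw [PySem.List.pyRange_one_eq_nil (by omega)]
    simp
  | succ fuel ih =>
    intro i hfuel h2 S F hInv
    by_cases hi : i < PySem.Int.floordiv number 2
    · have hiH : i < PySem.Int.floordiv (number + 1) 2 := lt_of_lt_of_le hi hH
      rw [PySem.List.pyRange_one_cons hi]
      rw [List.foldl_cons, List.filter_cons]
      by_cases hmem : i ∈ S
      · -- i is marked composite: it is skipped and removed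
        have hc : PySem.Set.contains S i = true := (PySem.Set.contains_iff S i).mpr hmem
        obtain ⟨-, p, hp2, hplt, hppr, hpdvd, -⟩ := (hInv i).mp hmem
        have hnpr : ¬ Nat.Prime i.toNat := pv_not_prime_of_div hp2 hplt hpdvd
        have hstep : primStep number (S, F) i = (PySem.Set.discard S i, F) := by
          unfold primStep
          rw [hc]
          simp
        rw [hstep]
        have hInv' : ∀ j, j ∈ PySem.Set.discard S i ↔ Phi number (i + 1) j := by
          intro j
          rw [PySem.Set.mem_discard, hInv j]
          constructor
          · rintro ⟨⟨hjH, q, hq2, hqlt, hqpr, hqdvd, hcase⟩, hne⟩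
            exact ⟨hjH, q, hq2, by omega, hqpr, hqdvd, by
              rcases hcase with h | h
              · exact Or.inl (by omega)
              · exact Or.inr h⟩
          · rintro ⟨hjH, q, hq2, hqlt, hqpr, hqdvd, hcase⟩
            have hqi : q ≠ i := fun he => hnpr (he ▸ hqpr)
            have hji : j ≠ i := by
              rintro rfl
              rcases hcase with h | h
              · omega
              · exact hnpr h
            refine ⟨⟨hjH, q, hq2, by omega, hqpr, hqdvd, ?_⟩, hji⟩
            rcases hcase with h | h
            · exact Or.inl (by omega)
            · exact Or.inr h
        rw [ih (i + 1) (by omega) (by omega) _ F hInv']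
        simp [hnpr]
      · -- i is unmarked: it is prime; number is tested and multiples are marked
        have hc : PySem.Set.contains S i = false := by
          rw [← Bool.not_eq_true, PySem.Set.contains_iff]
          exact hmem
        have hpr : Nat.Prime i.toNat := by
          by_contra hnpr
          obtain ⟨q, hq2, hqlt, hqpr, hqdvd⟩ := pv_exists_prime_div h2 hnpr
          exact hmem ((hInv i).mpr ⟨hiH, q, hq2, hqlt, hqpr, hqdvd, Or.inl le_rfl⟩)
        have hstep : primStep number (S, F) i =
            ((PySem.List.pyRange i (PySem.Int.floordiv (number + 1) 2) i).foldl PySem.Set.add S,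
              if PySem.Int.mod number i == 0 then F ++ [i] else F) := by
          unfold primStep
          rw [hc]
          simp
        rw [hstep]
        have hInv' : ∀ j,
            j ∈ (PySem.List.pyRange i (PySem.Int.floordiv (number + 1) 2) i).foldl PySem.Set.add S
              ↔ Phi number (i + 1) j := by
          intro j
          have hfold :
              (PySem.List.pyRange i (PySem.Int.floordiv (number + 1) 2) i).foldl PySem.Set.add S
                = (PySem.List.pyRange i (PySem.Int.floordiv (number + 1) 2) i).foldl
                    (fun s b => PySem.Set.add s (id b)) S := rfl
          rw [hfold, PySem.Set.mem_foldl_add]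
          have hrange : ∀ b, b ∈ PySem.List.pyRange i (PySem.Int.floordiv (number + 1) 2) i ↔
              i ≤ b ∧ b < PySem.Int.floordiv (number + 1) 2 ∧ i ∣ b := by
            intro b
            rw [PySem.List.mem_pyRange_iff_of_pos (by omega)]
            constructor
            · rintro ⟨hb1, hb2, hb3⟩
              exact ⟨hb1, hb2, by simpa using dvd_add hb3 (dvd_refl i)⟩
            · rintro ⟨hb1, hb2, hb3⟩
              exact ⟨hb1, hb2, dvd_sub hb3 (dvd_refl i)⟩
          constructor
          · rintro (hjS | ⟨b, hb, hjb⟩)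
            · obtain ⟨hjH, q, hq2, hqlt, hqpr, hqdvd, hcase⟩ := (hInv j).mp hjS
              refine ⟨hjH, q, hq2, by omega, hqpr, hqdvd, ?_⟩
              rcases hcase with h | h
              · rcases eq_or_lt_of_le h with he | h'
                · exact Or.inr (he ▸ hpr)
                · exact Or.inl (by omega)
              · exact Or.inr h
            · have hjb' : j = b := hjb
              obtain ⟨hb1, hb2, hb3⟩ := (hrange b).mp hb
              rw [← hjb'] at hb1 hb2 hb3
              refine ⟨hb2, i, h2, by omega, hpr, hb3, ?_⟩
              rcases eq_or_lt_of_le hb1 with he | h'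
              · exact Or.inr (he ▸ hpr)
              · exact Or.inl (by omega)
          · rintro ⟨hjH, q, hq2, hqlt, hqpr, hqdvd, hcase⟩
            rcases eq_or_lt_of_le (by omega : q ≤ i) with rfl | hqi
            · refine Or.inr ⟨j, (hrange j).mpr ⟨?_, hjH, hqdvd⟩, rfl⟩
              rcases hcase with h | h
              · omega
              · exact le_of_eq (pv_prime_dvd_eq hq2 h hqdvd)
            · refine Or.inl ((hInv j).mpr ⟨hjH, q, hq2, hqi, hqpr, hqdvd, ?_⟩)
              rcases hcase with h | h
              · exact Or.inl (by omega)
              · exact Or.inr h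
        rw [ih (i + 1) (by omega) (by omega) _ _ hInv']
        rcases eq_or_ne (PySem.Int.mod number i) 0 with hm | hm
        · simp [hpr, hm, List.append_assoc]
        · simp [hpr, hm]
    · rw [PySem.List.pyRange_one_eq_nil (by omega)]
      simp

-- ===== VERDICT (by name: the statement is the Claim_ definition above) =====
theorem prim_factors_spec : Claim_equal_prim_factors := by
  intro number _
  unfold Spec_prim_factors
  simp only [prim_factors, prim_factors_alt]
  have hInv : ∀ j : Int, j ∈ (PySem.Set.empty : PySem.Set Int) ↔ Phi number 2 j := by
    intro j
    simp only [PySem.Set.empty, List.not_mem_nil, false_iff, Phi, not_and, not_exists]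
    intro _ p hp
    omega
  have hF := pv_sieve number (PySem.Int.floordiv number 2 - 2).toNat 2 (le_refl _)
      (le_refl _) PySem.Set.empty [] hInv
  rw [List.nil_append] at hF
  have hfeq : (PySem.List.pyRange 2 (PySem.Int.floordiv number 2)).filter
        (fun x => decide (Nat.Prime x.toNat) && (PySem.Int.mod number x == 0))
      = (PySem.List.pyRange 2 (PySem.Int.floordiv number 2)).filter
        (fun d => PySem.Int.mod number d == 0 && is_prime d) := by
    apply List.filter_congr
    intro x hx
    have h2 : 2 ≤ x := (PySem.List.mem_pyRange_one.mp hx).1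
    have hips : is_prime x = decide (Nat.Prime x.toNat) := by
      by_cases hp : Nat.Prime x.toNat
      · simp [hp, (pv_is_prime_iff h2).mpr hp]
      · simp only [hp, decide_false]
        exact Bool.eq_false_iff.mpr (fun hc => hp ((pv_is_prime_iff h2).mp hc))
    rw [hips, Bool.and_comm]
  rw [hF, hfeq]
  cases h : (PySem.List.pyRange 2 (PySem.Int.floordiv number 2)).filter
      (fun d => PySem.Int.mod number d == 0 && is_prime d) with
  | nil => simp
  | cons a t => simp
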